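-- pv_equiv track=rewrite | github.com/ichsanulamal/Python-Fundamentals | Lab/Lab6_list function/Latihan16.py | list_sama
-- ===== SOURCE A (Python) =====
-- def list_sama(list1, list2):
--     #Mengubah keduanya menjadi list
--     list1.split()
--     list2.split()
--
--     lst1_dict = {}
--     lst2_dict = {}
--
--     #Menghitung jumlah angka di kedua list
--     for word in list1:
--         if word in lst1_dict:
--             lst1_dict[word] += 1
--         else:
--             lst1_dict[word] = 1
--
--     for word in list2:
--         if word in lst2_dict:
--             lst2_dict[word] += 1
--         else:
--             lst2_dict[word] = 1
--
--     #Jika dictionary(list1) = dictionary(list2) sama,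
--     #kembalikan nilai True
--     if lst1_dict == lst2_dict:
--         return True
--     return False
-- ===== SOURCE B (Python) =====
-- def list_sama(list1, list2):
--     # Same multiset of characters <=> equal sorted character sequences.
--     list1.split()
--     list2.split()
--     return sorted(list1) == sorted(list2)
-- ===== Notes on version B (the rewrite author's own statement) =====
-- stated objective: idiomatic
-- what changed: Replaces the two frequency-dictionary loops and the dict comparison with a single sort-based multiset check: sorted(list1) == sorted(list2).
import Mathlib
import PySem

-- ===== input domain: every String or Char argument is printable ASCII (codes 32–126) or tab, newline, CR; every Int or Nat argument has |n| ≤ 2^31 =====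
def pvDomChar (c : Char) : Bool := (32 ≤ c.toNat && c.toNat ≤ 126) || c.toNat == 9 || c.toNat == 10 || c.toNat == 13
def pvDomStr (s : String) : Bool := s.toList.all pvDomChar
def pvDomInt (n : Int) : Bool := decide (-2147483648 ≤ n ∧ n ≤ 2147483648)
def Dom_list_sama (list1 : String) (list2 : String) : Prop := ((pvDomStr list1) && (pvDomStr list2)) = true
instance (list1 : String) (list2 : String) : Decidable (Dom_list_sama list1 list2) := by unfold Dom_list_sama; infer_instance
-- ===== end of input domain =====

-- B replaces A's two character-frequency dictionaries and the dict comparison by a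
-- single sort-based multiset check: sorted(list1) == sorted(list2) (idiomatic).

-- ===== PORT A =====
-- the 'for word in listN' counting loop of A (branch order preserved)
def pvCountLoop (s : List Char) : PySem.Dict Char Int :=
  s.foldl (fun d w => if d.contains w then d.modify w 0 (· + 1) else d.insert w 1)
    PySem.Dict.empty

def list_sama (list1 : String) (list2 : String) : Bool :=
  -- list1.split(); list2.split(): results discarded, no effect on a String argument
  let lst1_dict := pvCountLoop list1.toList
  let lst2_dict := pvCountLoop list2.toList
  -- Python's 'lst1_dict == lst2_dict' compares the dicts as unordered maps:
  -- same keys and, at every key, the same value (exact; insertion order ignored)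
  (lst1_dict.keys.all fun k => lst2_dict.get? k == lst1_dict.get? k) &&
  (lst2_dict.keys.all fun k => lst1_dict.get? k == lst2_dict.get? k)

-- ===== PORT B =====
def list_sama_alt (list1 : String) (list2 : String) : Bool :=
  -- sorted(list1) == sorted(list2)
  PySem.List.sorted list1.toList (fun x => x) false ==
  PySem.List.sorted list2.toList (fun x => x) false

-- ===== PRECONDITION & SPEC =====
def Spec_list_sama (list1 : String) (list2 : String) (out : Bool) : Prop := out = list_sama_alt list1 list2
instance (list1 : String) (list2 : String) (out : Bool) : Decidable (Spec_list_sama list1 list2 out) := by unfold Spec_list_sama; infer_instance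

-- ===== CLAIM (what is proved, stated in full; the proofs are below) =====
def Claim_equal_list_sama : Prop := ∀ (list1 : String) (list2 : String), Dom_list_sama list1 list2 → Spec_list_sama list1 list2 (list_sama list1 list2)

-- ===== LEMMAS AND PROOFS =====

-- A's counting-loop step sets d[w] to d.get(w, 0) + 1 whether or not w is present
theorem pvCountLoop_eq_counter (s : List Char) : pvCountLoop s = PySem.Dict.counter s := by
  have hstep : (fun (d : PySem.Dict Char Int) (w : Char) =>
      if d.contains w then d.modify w 0 (· + 1) else d.insert w 1)
      = fun d w => d.modify w 0 (· + 1) := by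
    funext d w
    by_cases h : d.contains w = true
    · simp [h]
    · simp only [Bool.not_eq_true] at h
      simp only [h, if_neg Bool.false_ne_true]
      apply PySem.Dict.ext
      simp [PySem.Dict.insert, PySem.Dict.modify, h,
        PySem.Dict.getD_of_not_contains _ _ h]
  simp [pvCountLoop, PySem.Dict.counter_eq_foldl, hstep]

theorem pvCount_get? (s : List Char) (k : Char) :
    (pvCountLoop s).get? k = if k ∈ s then some (s.count k : Int) else none := by
  rw [pvCountLoop_eq_counter]
  by_cases h : k ∈ s
  · have hc : (PySem.Dict.counter s).contains k = true := by
      simp [PySem.Dict.contains_counter, h]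
    rw [PySem.Dict.contains_eq_isSome_get?] at hc
    obtain ⟨v, hv⟩ := Option.isSome_iff_exists.mp hc
    have := PySem.Dict.getD_counter (xs := s) (v := k)
    rw [PySem.Dict.getD_eq_get?_getD, hv] at this
    simp only [Option.getD_some] at this
    simp [h, hv, this]
  · have hc : (PySem.Dict.counter s).contains k = false := by
      simp [PySem.Dict.contains_counter, h]
    simp [h, (PySem.Dict.get?_eq_none_iff_contains _ _).mpr hc]

theorem list_sama_eq_perm (l1 l2 : String) :
    list_sama l1 l2 = decide (l1.toList.Perm l2.toList) := by
  rw [Bool.eq_iff_iff]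
  simp only [list_sama, Bool.and_eq_true, List.all_eq_true, pvCount_get?,
    decide_eq_true_eq, List.perm_iff_count]
  simp only [pvCountLoop_eq_counter, PySem.Dict.keys_counter, PySem.Set.mem_ofList]
  constructor
  · rintro ⟨h1, h2⟩ a
    by_cases ha1 : a ∈ l1.toList
    · have := h1 a ha1
      by_cases ha2 : a ∈ l2.toList
      · simp only [ha1, ha2, if_true, beq_iff_eq, Option.some.injEq, Nat.cast_inj] at this
        exact this.symm
      · simp [ha1, ha2] at this
    · by_cases ha2 : a ∈ l2.toList
      · have := h2 a ha2
        simp [ha1, ha2] at this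
      · simp [List.count_eq_zero_of_not_mem ha1, List.count_eq_zero_of_not_mem ha2]
  · intro h
    have hmem : ∀ a, a ∈ l1.toList ↔ a ∈ l2.toList := by
      intro a
      rw [← List.count_pos_iff, ← List.count_pos_iff, h a]
    refine ⟨fun k hk => ?_, fun k hk => ?_⟩
    · simp [hk, (hmem k).mp hk, h k]
    · simp [hk, (hmem k).mpr hk, h k]

theorem list_sama_alt_eq_perm (l1 l2 : String) :
    list_sama_alt l1 l2 = decide (l1.toList.Perm l2.toList) := by
  rw [Bool.eq_iff_iff]
  simp [list_sama_alt, PySem.List.sorted_id_eq_sorted_id_iff_perm]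

-- ===== VERDICT (by name: the statement is the Claim_ definition above) =====
theorem list_sama_spec : Claim_equal_list_sama := by
  intro l1 l2 _
  unfold Spec_list_sama
  rw [list_sama_eq_perm, list_sama_alt_eq_perm]
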